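-- pv_equiv track=rewrite | github.com/stevenli518/CuBoulder_ECEN4763_Embedded_Algorithm | Assignment9/compression/lzss/lzss.py | lzss_decode
-- ===== SOURCE A (Python) =====
-- def lzss_decode(encoding):
--     """Decode the input encoding with LZSS decoding."""
--     i = 0
--     output = ''
--     count = 0
--     length = 0
--     offset = 0
--     lenofencoding = len(encoding)
--     while i < lenofencoding:
--         j = i
--         comma = 0
--         if encoding[j] == '(':
--             while encoding[j] != ')':
--                 if encoding[j] == ',':
--                     comma = j
--                     j += 1
--                 else:
--                     j += 1
--             offset = int(encoding[i+1:comma])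
--             length = int(encoding[comma+1:j])
--             while count < length:
--                 output += output[offset+count]
--                 count += 1
--             if count >= length:
--                 i += 3 + len(str(offset)) + len(str(length))
--                 count = 0
--                 length = 0
--                 offset = 0
--         else:
--             output += encoding[i]
--             i += 1
--     return output
-- ===== SOURCE B (Python) =====
-- def lzss_decode(encoding):
--     """Decode the input encoding with LZSS decoding (two-pass: tokenize, then render)."""
--     tokens = []
--     i = 0
--     n = len(encoding)
--     while i < n:
--         if encoding[i] == '(':
--             j = i
--             comma = 0
--             while encoding[j] != ')':
--                 if encoding[j] == ',':
--                     comma = j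
--                 j += 1
--             offset = int(encoding[i+1:comma])
--             length = int(encoding[comma+1:j])
--             tokens.append((offset, length))
--             i += 3 + len(str(offset)) + len(str(length))
--         else:
--             tokens.append(encoding[i])
--             i += 1
--     out = []
--     for tok in tokens:
--         if isinstance(tok, tuple):
--             offset, length = tok
--             for c in range(length):
--                 out.append(out[offset + c])
--         else:
--             out.append(tok)
--     return ''.join(out)
-- ===== Notes on version B (the rewrite author's own statement) =====
-- stated objective: faster
-- what changed: A decodes in one interleaved scan that parses a token and immediately performs the overlapping copy, growing the output with quadratic string concatenation; B first tokenizes the encoding into a list of literals and (offset,length) pairs, then a second pass renders the output into a list buffer joined once at the end.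
-- outside the precondition, e.g. on lzss_decode('ab(-1,2)'): A returns 'abba', B returns 'abba'; on lzss_decode('ab(01,1)'): A returns 'abb)', B returns 'abb)'
import Mathlib
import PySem

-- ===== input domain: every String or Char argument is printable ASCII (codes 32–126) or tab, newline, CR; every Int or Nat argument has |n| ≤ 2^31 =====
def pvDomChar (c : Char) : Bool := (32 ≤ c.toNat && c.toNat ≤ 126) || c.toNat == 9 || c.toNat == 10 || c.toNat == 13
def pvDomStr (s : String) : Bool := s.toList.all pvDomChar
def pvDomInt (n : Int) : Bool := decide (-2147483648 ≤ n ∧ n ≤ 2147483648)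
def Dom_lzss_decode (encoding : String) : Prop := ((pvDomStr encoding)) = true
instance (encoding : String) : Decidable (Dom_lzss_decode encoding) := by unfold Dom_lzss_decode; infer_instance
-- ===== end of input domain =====

-- B keeps A's tokenization rules but splits decoding into a tokenize pass and a render pass,
-- replacing A's quadratic string concatenation by a list buffer joined once (measured faster).

-- ===== PORT A =====
-- the inner `while encoding[j] != ')'` scan of A (this identical loop also appears verbatim in B's
-- tokenizer); structural recursion on the unscanned suffix cs.drop j; returns (comma, j) at the ')';
-- none = the scan runs off the end (IndexError)
def lzssScan (rest : List Char) (j comma : Nat) : Option (Nat × Nat) :=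
  match rest with
  | [] => none
  | c :: rest' =>
    if c = ')' then some (comma, j)
    else if c = ',' then lzssScan rest' (j + 1) j
    else lzssScan rest' (j + 1) comma

-- A's inner copy loop: `while count < length: output += output[offset+count]; count += 1`.
-- `n` is the number of iterations still to run (n = (length - count).toNat, so `count < length` ↔ n > 0);
-- none = IndexError
def lzssCopyA (n : Nat) (out : List Char) (offset count : Int) : Option (List Char) :=
  match n with
  | 0 => some out
  | n + 1 =>
    match PySem.List.pyGet? out (offset + count) with
    | some ch => lzssCopyA n (out ++ [ch]) offset (count + 1)
    | none => none

-- A's outer while loop; `fuel` only makes the recursion structural: every iteration advances i by at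
-- least 1, so with fuel = cs.length + 1 the fuel-exhausted branch is never reached.
-- none = the Python raises (IndexError/ValueError)
def lzssLoopA (cs : List Char) (fuel : Nat) (i : Nat) (out : List Char) : Option (List Char) :=
  match fuel with
  | 0 => if cs.length ≤ i then some out else none
  | fuel + 1 =>
    if h : i < cs.length then
      if cs[i] = '(' then
        match lzssScan (cs.drop i) i 0 with
        | none => none
        | some (comma, j) =>
          match PySem.Int.ofChars? (PySem.List.slice cs (some ((i : Int) + 1)) (some (comma : Int))),
                PySem.Int.ofChars? (PySem.List.slice cs (some ((comma : Int) + 1)) (some (j : Int))) with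
          | some offset, some length =>
            match lzssCopyA length.toNat out offset 0 with
            | some out' =>
              lzssLoopA cs fuel (i + 3 + (PySem.Int.toChars offset).length + (PySem.Int.toChars length).length) out'
            | none => none
          | _, _ => none
      else lzssLoopA cs fuel (i + 1) (out ++ [cs[i]])
    else some out

def lzss_decode (encoding : String) : String :=
  match lzssLoopA encoding.toList (encoding.toList.length + 1) 0 [] with
  | some out => String.mk out
  | none => ""          -- unreachable under Pre_ (the Python raises exactly there)

-- ===== PORT B =====
inductive LzssTok where
  | lit : Char → LzssTok
  | ref : Int → Int → LzssTok
deriving DecidableEq, Repr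

-- B's first pass: tokenize with the same scan / int / cursor-advance rules as A (same fuel device)
def lzssTokenize (cs : List Char) (fuel : Nat) (i : Nat) : Option (List LzssTok) :=
  match fuel with
  | 0 => if cs.length ≤ i then some [] else none
  | fuel + 1 =>
    if h : i < cs.length then
      if cs[i] = '(' then
        match lzssScan (cs.drop i) i 0 with
        | none => none
        | some (comma, j) =>
          match PySem.Int.ofChars? (PySem.List.slice cs (some ((i : Int) + 1)) (some (comma : Int))),
                PySem.Int.ofChars? (PySem.List.slice cs (some ((comma : Int) + 1)) (some (j : Int))) with
          | some offset, some length =>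
            (lzssTokenize cs fuel (i + 3 + (PySem.Int.toChars offset).length + (PySem.Int.toChars length).length)).map
              (fun ts => LzssTok.ref offset length :: ts)
          | _, _ => none
      else (lzssTokenize cs fuel (i + 1)).map (fun ts => LzssTok.lit cs[i] :: ts)
    else some []

-- B's overlapping copy: `for c in range(length): out.append(out[offset + c])`
def lzssCopyB (out : List Char) (offset length : Int) : Option (List Char) :=
  (PySem.List.pyRange 0 length 1).foldl
    (fun acc c =>
      match acc with
      | none => none
      | some o =>
        match PySem.List.pyGet? o (offset + c) with
        | some ch => some (o ++ [ch])
        | none => none)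
    (some out)

-- B's second pass: render the token list into the output buffer
def lzssRender (toks : List LzssTok) (out : List Char) : Option (List Char) :=
  match toks with
  | [] => some out
  | LzssTok.lit c :: ts => lzssRender ts (out ++ [c])
  | LzssTok.ref offset length :: ts =>
    match lzssCopyB out offset length with
    | some out' => lzssRender ts out'
    | none => none

def lzss_decode_alt (encoding : String) : String :=
  match (lzssTokenize encoding.toList (encoding.toList.length + 1) 0).bind (fun ts => lzssRender ts []) with
  | some out => String.mk out
  | none => ""

-- ===== PRECONDITION & SPEC =====
-- Closed-form well-formedness (a grammar check, not the port's scan): every '(' starts a token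
-- "(" ++ str(offset) ++ "," ++ str(length) ++ ")" with canonically printed non-negative integers and,
-- when length > 0, offset below the length L of the output produced so far.
-- `n` counts the characters not yet examined (n = cs.length - i), so the recursion is structural.
def lzssGoodAux (cs : List Char) (n : Nat) (i L : Nat) : Bool :=
  match n with
  | 0 => decide (cs.length ≤ i)
  | n + 1 =>
    if h : i < cs.length then
      if cs[i] = '(' then
        let body := (cs.drop (i + 1)).takeWhile (fun c => c ≠ ')')
        if i + 1 + body.length < cs.length then
          let k := body.idxOf ','
          if k < body.length then
            match PySem.Int.ofChars? (body.take k), PySem.Int.ofChars? (body.drop (k + 1)) with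
            | some off, some len =>
              decide (0 ≤ off) && decide (0 ≤ len) &&
              (PySem.Int.toChars off == body.take k) && (PySem.Int.toChars len == body.drop (k + 1)) &&
              (decide (len ≤ 0) || decide (off < (L : Int))) &&
              lzssGoodAux cs n (i + 2 + body.length) (L + len.toNat)
            | _, _ => false
          else false
        else false
      else lzssGoodAux cs n (i + 1) (L + 1)
    else true

-- Pre_ excludes the inputs where A raises (unterminated or unparsable tokens, out-of-range copies) and,
-- stating it in closed form, also the non-canonical tokens (leading zeros, '+', '_', negative offsets)
-- whose desynchronised cursor advance / negative-index wraparound is an accident of A's implementation;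
-- where A happens to return on those, B returns the same value.
def Pre_lzss_decode (encoding : String) : Prop :=
  lzssGoodAux encoding.toList encoding.toList.length 0 0 = true
instance (encoding : String) : Decidable (Pre_lzss_decode encoding) := by
  unfold Pre_lzss_decode; infer_instance

def pvWitness_lzss_decode : String := "ab(0,2)c(1,3)"

def Spec_lzss_decode (encoding : String) (out : String) : Prop := out = lzss_decode_alt encoding
instance (encoding : String) (out : String) : Decidable (Spec_lzss_decode encoding out) := by
  unfold Spec_lzss_decode; infer_instance

-- ===== CLAIM (what is proved, stated in full; the proofs are below) =====
def Claim_equal_lzss_decode : Prop :=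
  ∀ (encoding : String), Dom_lzss_decode encoding → Pre_lzss_decode encoding →
    Spec_lzss_decode encoding (lzss_decode encoding)

-- ===== LEMMAS AND PROOFS =====

-- the failing fold stays failed
theorem lzssFold_none (l : List Int) (offset : Int) :
    l.foldl
      (fun acc c =>
        match acc with
        | none => none
        | some o =>
          match PySem.List.pyGet? o (offset + c) with
          | some ch => some (o ++ [ch])
          | none => none)
      (none : Option (List Char)) = none := by
  induction l with
  | nil => rfl
  | cons x xs ih => simpa using ih

-- A's counted while-copy equals B's range-fold, generalized over the running count
theorem lzssCopyA_eq_fold (n : Nat) (count : Int) (out : List Char) (offset : Int) :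
    lzssCopyA n out offset count =
      (PySem.List.pyRange count (count + n) 1).foldl
        (fun acc c =>
          match acc with
          | none => none
          | some o =>
            match PySem.List.pyGet? o (offset + c) with
            | some ch => some (o ++ [ch])
            | none => none)
        (some out) := by
  induction n generalizing count out with
  | zero => rw [PySem.List.pyRange_one_eq_nil (by omega)]; rfl
  | succ n ih =>
    rw [PySem.List.pyRange_one_cons (by omega)]
    simp only [List.foldl_cons, lzssCopyA]
    cases hg : PySem.List.pyGet? out (offset + count) with
    | none => simp [lzssFold_none]
    | some ch =>
      have : count + (↑(n + 1) : Int) = (count + 1) + ↑n := by push_cast; ring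
      rw [this]
      exact ih (count + 1) (out ++ [ch])

theorem lzssCopyA_eq_copyB (out : List Char) (offset length : Int) :
    lzssCopyA length.toNat out offset 0 = lzssCopyB out offset length := by
  rw [lzssCopyB, lzssCopyA_eq_fold]
  by_cases h : 0 ≤ length
  · rw [Int.toNat_of_nonneg h, Int.zero_add]
  · rw [Int.toNat_of_nonpos (by omega)]
    rw [PySem.List.pyRange_one_eq_nil (by omega), PySem.List.pyRange_one_eq_nil (by omega)]

-- fusion: A's interleaved loop = B's tokenize-then-render, for every fuel value
theorem lzssLoopA_eq (cs : List Char) (fuel : Nat) (i : Nat) (out : List Char) :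
    lzssLoopA cs fuel i out = (lzssTokenize cs fuel i).bind (fun ts => lzssRender ts out) := by
  induction fuel generalizing i out with
  | zero =>
    simp only [lzssLoopA, lzssTokenize]
    by_cases h : cs.length ≤ i <;> simp [h, lzssRender]
  | succ fuel ih =>
    simp only [lzssLoopA, lzssTokenize]
    by_cases h : i < cs.length
    · simp only [dif_pos h]
      by_cases hp : cs[i] = '('
      · simp only [if_pos hp]
        cases hscan : lzssScan (cs.drop i) i 0 with
        | none => simp [hscan]
        | some cj =>
          obtain ⟨comma, j⟩ := cj
          cases ho : PySem.Int.ofChars? (PySem.List.slice cs (some ((i : Int) + 1)) (some (comma : Int))) with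
          | none => simp [ho]
          | some offset =>
            cases hl : PySem.Int.ofChars? (PySem.List.slice cs (some ((comma : Int) + 1)) (some (j : Int))) with
            | none => simp [ho, hl]
            | some length =>
              simp only [ho, hl]
              cases hcopy : lzssCopyA length.toNat out offset 0 with
              | none =>
                cases htok : lzssTokenize cs fuel (i + 3 + (PySem.Int.toChars offset).length + (PySem.Int.toChars length).length) with
                | none => simp [htok]
                | some ts => simp [htok, lzssRender, ← lzssCopyA_eq_copyB, hcopy]
              | some out' =>
                simp only [ih]
                cases htok : lzssTokenize cs fuel (i + 3 + (PySem.Int.toChars offset).length + (PySem.Int.toChars length).length) with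
                | none => simp [htok]
                | some ts => simp [htok, lzssRender, ← lzssCopyA_eq_copyB, hcopy]
      · simp only [if_neg hp]
        simp only [ih]
        cases htok : lzssTokenize cs fuel (i + 1) with
        | none => simp [htok]
        | some ts => simp [htok, lzssRender]
    · simp [dif_neg h, lzssRender]

-- ===== VERDICT (by name: the statement is the Claim_ definition above) =====
theorem lzss_decode_spec : Claim_equal_lzss_decode := by
  intro encoding _ _
  unfold Spec_lzss_decode lzss_decode lzss_decode_alt
  rw [lzssLoopA_eq]
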